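-- pv_equiv track=rewrite | github.com/cantux/epi | gfaul/monotone_stack.py | prev_larger_element
-- ===== SOURCE A (Python) =====
-- def prev_larger_element(arr):
--     s = []
--     len_a = len(arr)
--     prev_arr = [-1] * len_a
--
--     for i in range(len_a):
--         while s and arr[s[-1]] < arr[i]:
--             s.pop()
--         prev_arr[i] = s[-1] if s else -1
--         s.append(i)
--     return prev_arr
-- ===== SOURCE B (Python) =====
-- def prev_larger_element(arr):
--     n = len(arr)
--     prev_arr = [-1] * n
--     for i in range(n):
--         j = i - 1
--         while j >= 0 and arr[j] < arr[i]:
--             j = prev_arr[j]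
--         prev_arr[i] = j
--     return prev_arr
-- ===== Notes on version B (the rewrite author's own statement) =====
-- stated objective: alternative
-- what changed: Replaces the explicit monotone stack with skip-pointer jumps through the output array itself (j = prev_arr[j]), so no auxiliary stack is kept.
import Mathlib
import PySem

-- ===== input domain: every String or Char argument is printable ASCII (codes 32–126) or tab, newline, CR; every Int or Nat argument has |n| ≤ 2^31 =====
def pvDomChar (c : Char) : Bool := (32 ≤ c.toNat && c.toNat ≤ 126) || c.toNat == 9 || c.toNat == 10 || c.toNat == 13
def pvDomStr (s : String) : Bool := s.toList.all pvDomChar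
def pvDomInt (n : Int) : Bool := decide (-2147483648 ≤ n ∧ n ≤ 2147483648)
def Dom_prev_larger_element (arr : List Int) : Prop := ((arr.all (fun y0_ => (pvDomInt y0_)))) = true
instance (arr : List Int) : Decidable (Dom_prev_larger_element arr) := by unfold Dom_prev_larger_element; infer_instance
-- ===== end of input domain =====

-- B replaces A's explicit monotone stack by skip-pointer jumps through the output array itself
-- (j = prev_arr[j]); same O(n) cost, no auxiliary stack (objective: alternative).

-- ===== PORT A =====
-- helper: the head of the stack as Python's `s[-1] if s else -1` (top of stack = list head here)
def pleHeadIdx (s : List Nat) : Int :=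
  match s with
  | [] => -1
  | t :: _ => (t : Int)

-- the `while s and arr[s[-1]] < arr[i]: s.pop()` loop (stack top at the head; indices are
-- in range 0..len-1 by construction, so getD with default 0 is exact for Python's arr[s[-1]])
def plePop (arr : List Int) (x : Int) : List Nat → List Nat
  | [] => []
  | t :: rest => if arr.getD t 0 < x then plePop arr x rest else t :: rest

-- one iteration of A's `for i in range(len_a)` body over the state (stack, prev_arr)
def pleStepA (arr : List Int) (st : List Nat × List Int) (i : Nat) : List Nat × List Int :=
  let s := plePop arr (arr.getD i 0) st.1
  (i :: s, st.2.set i (pleHeadIdx s))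

def prev_larger_element (arr : List Int) : List Int :=
  ((List.range arr.length).foldl (pleStepA arr) ([], List.replicate arr.length (-1))).2

-- ===== PORT B =====
-- the `while j >= 0 and arr[j] < arr[i]: j = prev_arr[j]` loop; fuel i bounds the number of
-- iterations exactly (j starts at i-1 and strictly decreases along the skip chain), so this
-- is the Python loop step for step; j ≥ 0 is checked before indexing, so toNat/getD are exact
def pleJump (arr prev : List Int) (x : Int) : Nat → Int → Int
  | 0, j => j
  | fuel + 1, j =>
      if 0 ≤ j ∧ arr.getD j.toNat 0 < x then pleJump arr prev x fuel (prev.getD j.toNat 0)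
      else j

-- one iteration of B's `for i in range(n)` body over prev_arr
def pleStepB (arr : List Int) (prev : List Int) (i : Nat) : List Int :=
  prev.set i (pleJump arr prev (arr.getD i 0) i ((i : Int) - 1))

def prev_larger_element_alt (arr : List Int) : List Int :=
  (List.range arr.length).foldl (pleStepB arr) (List.replicate arr.length (-1))

-- ===== PRECONDITION & SPEC =====
def Spec_prev_larger_element (arr : List Int) (out : List Int) : Prop := out = prev_larger_element_alt arr
instance (arr : List Int) (out : List Int) : Decidable (Spec_prev_larger_element arr out) := by unfold Spec_prev_larger_element; infer_instance

-- ===== CLAIM (what is proved, stated in full; the proofs are below) =====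
def Claim_equal_prev_larger_element : Prop := ∀ (arr : List Int), Dom_prev_larger_element arr → Spec_prev_larger_element arr (prev_larger_element arr)

-- ===== LEMMAS AND PROOFS =====

-- the stack s lists the skip chain of p starting at c: s = [] and c = -1, or c = head s and
-- the tail is the chain from p[head]
inductive PleFollows (p : List Int) : List Nat → Int → Prop
  | nil : PleFollows p [] (-1)
  | cons (a : Nat) (rest : List Nat) :
      PleFollows p rest (p.getD a 0) → PleFollows p (a :: rest) (a : Int)

-- loop invariant tying A's stack to B's prev array before step k
def PleInv (n : Nat) (p : List Int) (s : List Nat) (k : Nat) : Prop :=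
  p.length = n ∧ s.length ≤ k ∧ (∀ a ∈ s, a < k) ∧ PleFollows p s ((k : Int) - 1)

lemma plePop_follows (arr : List Int) (x : Int) {p : List Int} {s : List Nat} {c : Int}
    (h : PleFollows p s c) :
    PleFollows p (plePop arr x s) (pleHeadIdx (plePop arr x s)) := by
  induction h with
  | nil => exact .nil
  | cons a rest hr ih =>
      simp only [plePop]
      split
      · exact ih
      · exact .cons a rest hr

lemma plePop_subset (arr : List Int) (x : Int) (s : List Nat) :
    ∀ a ∈ plePop arr x s, a ∈ s := by
  induction s with
  | nil => simp [plePop]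
  | cons t rest ih =>
      simp only [plePop]
      split
      · intro a ha; exact List.mem_cons_of_mem _ (ih a ha)
      · intro a ha; exact ha

lemma plePop_length (arr : List Int) (x : Int) (s : List Nat) :
    (plePop arr x s).length ≤ s.length := by
  induction s with
  | nil => simp [plePop]
  | cons t rest ih =>
      simp only [plePop]
      split
      · exact Nat.le_succ_of_le ih
      · exact Nat.le_refl _

lemma pleJump_eq (arr : List Int) (x : Int) {p : List Int} :
    ∀ {s : List Nat} {c : Int}, PleFollows p s c → ∀ fuel, s.length ≤ fuel →
      pleJump arr p x fuel c = pleHeadIdx (plePop arr x s) := by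
  intro s c h
  induction h with
  | nil =>
      intro fuel _
      cases fuel with
      | zero => rfl
      | succ f => simp [pleJump, plePop, pleHeadIdx]
  | cons a rest hr ih =>
      intro fuel hf
      cases fuel with
      | zero => simp at hf
      | succ f =>
          simp only [pleJump, plePop]
          have ha : (0 : Int) ≤ (a : Int) := Int.natCast_nonneg a
          have hta : ((a : Int)).toNat = a := Int.toNat_natCast a
          by_cases hlt : arr.getD a 0 < x
          · rw [if_pos ⟨ha, by rw [hta]; exact hlt⟩, if_pos hlt, hta]
            exact ih f (Nat.le_of_succ_le_succ hf)
          · rw [if_neg (by rw [hta]; exact fun hc => hlt hc.2), if_neg hlt]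
            rfl

lemma PleFollows_congr {p q : List Int} {s : List Nat} {c : Int}
    (hpq : ∀ a ∈ s, p.getD a 0 = q.getD a 0) (h : PleFollows p s c) :
    PleFollows q s c := by
  induction h with
  | nil => exact .nil
  | cons a rest hr ih =>
      refine .cons a rest ?_
      rw [← hpq a (List.mem_cons_self)]
      exact ih (fun b hb => hpq b (List.mem_cons_of_mem _ hb))

lemma pleStep_eq (arr : List Int) {p : List Int} {s : List Nat} {i : Nat}
    (hi : i < arr.length) (hinv : PleInv arr.length p s i) :
    pleStepA arr (s, p) i = (i :: plePop arr (arr.getD i 0) s, pleStepB arr p i) ∧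
      PleInv arr.length (pleStepB arr p i) (i :: plePop arr (arr.getD i 0) s) (i + 1) := by
  obtain ⟨hlen, hsl, hmem, hfol⟩ := hinv
  set x := arr.getD i 0 with hx
  set s' := plePop arr x s with hs'
  have hjump : pleJump arr p x i ((i : Int) - 1) = pleHeadIdx s' :=
    pleJump_eq arr x hfol i hsl
  have hB : pleStepB arr p i = p.set i (pleHeadIdx s') := by
    simp only [pleStepB, ← hx, hjump]
  have hfol' : PleFollows p s' (pleHeadIdx s') := plePop_follows arr x hfol
  have hmem' : ∀ a ∈ s', a < i := fun a ha => hmem a (plePop_subset arr x s a ha)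
  have hunchanged : ∀ a ∈ s', p.getD a 0 = (p.set i (pleHeadIdx s')).getD a 0 := by
    intro a ha
    have : a ≠ i := Nat.ne_of_lt (hmem' a ha)
    simp [List.getD, List.getElem?_set_ne (Ne.symm this)]
  constructor
  · simp only [pleStepA, hB, ← hx, ← hs']
  · refine ⟨by simp [hB, hlen], ?_, ?_, ?_⟩
    · simpa using Nat.succ_le_succ (Nat.le_trans (plePop_length arr x s) hsl)
    · intro a ha
      rcases List.mem_cons.mp ha with h | h
      · omega
      · exact Nat.lt_succ_of_lt (hmem' a h)
    · have hset : (p.set i (pleHeadIdx s')).getD i 0 = pleHeadIdx s' := by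
        simp [List.getD, hlen.symm ▸ hi]
      have : PleFollows (p.set i (pleHeadIdx s')) s'
          ((p.set i (pleHeadIdx s')).getD i 0) := by
        rw [hset]; exact PleFollows_congr hunchanged hfol'
      have hcast : ((i + 1 : Nat) : Int) - 1 = (i : Int) := by push_cast; ring
      rw [hB, hcast]
      exact .cons i s' this

lemma pleFold (arr : List Int) : ∀ k, k ≤ arr.length →
    ((List.range k).foldl (pleStepA arr) ([], List.replicate arr.length (-1))).2
        = (List.range k).foldl (pleStepB arr) (List.replicate arr.length (-1)) ∧
      PleInv arr.length
        ((List.range k).foldl (pleStepB arr) (List.replicate arr.length (-1)))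
        ((List.range k).foldl (pleStepA arr) ([], List.replicate arr.length (-1))).1 k := by
  intro k
  induction k with
  | zero =>
      intro _
      refine ⟨rfl, by simp, by simp, by simp, ?_⟩
      exact (by norm_num : ((0 : Nat) : Int) - 1 = -1) ▸ PleFollows.nil
  | succ k ih =>
      intro hk
      have hk' : k ≤ arr.length := Nat.le_of_succ_le hk
      obtain ⟨heq, hinv⟩ := ih hk'
      set A := (List.range k).foldl (pleStepA arr) ([], List.replicate arr.length (-1)) with hA
      set B := (List.range k).foldl (pleStepB arr) (List.replicate arr.length (-1)) with hB
      have hApair : A = (A.1, B) := by rw [← heq]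
      have hstep := pleStep_eq arr (Nat.lt_of_succ_le hk) hinv
      rw [List.range_succ, List.foldl_append, List.foldl_append, ← hA, ← hB]
      simp only [List.foldl_cons, List.foldl_nil]
      rw [hApair, hstep.1]
      exact ⟨rfl, hstep.2⟩

-- ===== VERDICT (by name: the statement is the Claim_ definition above) =====
theorem prev_larger_element_spec : Claim_equal_prev_larger_element := by
  intro arr _
  show prev_larger_element arr = prev_larger_element_alt arr
  exact (pleFold arr arr.length (Nat.le_refl _)).1
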